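-- pv_equiv track=rewrite | github.com/ayman-elkassas/Python-Notebooks | 3-OOP and DSA/3-Algorithm Analysis/Excersices/2-count of sum prefix list1 to another list.py | countTotal
-- ===== SOURCE A (Python) =====
-- def countTotal(ls,B):
--     n=len(ls)
--     count=0
--     for i in range(n):
--         total = 0
--         for j in range(n):
--             for k in range(1+j):
--                 total+=ls[k]
--         if total==B[i]:
--             count+=1
--     return count
-- ===== SOURCE B (Python) =====
-- def countTotal(ls, B):
--     # The inner double loop of A computes the same value for every i:
--     # total = sum of all prefix sums of ls.  Compute it once in one pass,
--     # then count how many of the first len(ls) entries of B equal it.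
--     run = 0
--     total = 0
--     for x in ls:
--         run += x
--         total += run
--     count = 0
--     for i in range(len(ls)):
--         if B[i] == total:
--             count += 1
--     return count
-- ===== Notes on version B (the rewrite author's own statement) =====
-- stated objective: faster
-- what changed: A recomputes the sum of all prefix sums of ls from scratch with a cubic triple loop for every index i; B computes that invariant total once with a single running-prefix-sum pass and then counts matches in one linear scan.
import Mathlib
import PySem

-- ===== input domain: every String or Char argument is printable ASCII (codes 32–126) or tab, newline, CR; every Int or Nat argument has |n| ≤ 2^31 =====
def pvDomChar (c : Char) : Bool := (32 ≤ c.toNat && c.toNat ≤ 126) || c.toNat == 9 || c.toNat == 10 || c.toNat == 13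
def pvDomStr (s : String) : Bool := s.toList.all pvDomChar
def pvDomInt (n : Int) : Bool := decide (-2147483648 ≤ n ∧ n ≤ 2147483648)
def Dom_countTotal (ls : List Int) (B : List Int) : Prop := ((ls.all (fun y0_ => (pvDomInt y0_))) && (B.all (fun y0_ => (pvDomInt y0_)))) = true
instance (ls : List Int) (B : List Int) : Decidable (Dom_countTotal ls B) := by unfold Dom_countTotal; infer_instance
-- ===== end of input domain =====

-- B replaces A's per-i cubic recomputation of the sum of all prefix sums of ls by a
-- single running-prefix-sum pass computing that invariant total once, then one linear
-- counting scan over B's first len(ls) entries.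

-- ===== PORT A =====
-- Indexing ls[k] / B[i] uses pyGetD with default 0; inside Pre_countTotal every index
-- is in range, so this agrees with Python exactly there.
def countTotal (ls : List Int) (B : List Int) : Int :=
  let n : Int := (ls.length : Int)
  (PySem.List.pyRange 0 n 1).foldl (fun count i =>
    let total : Int :=
      (PySem.List.pyRange 0 n 1).foldl (fun total j =>
        (PySem.List.pyRange 0 (1 + j) 1).foldl (fun total k =>
          total + PySem.List.pyGetD ls k 0) total) 0
    if total = PySem.List.pyGetD B i 0 then count + 1 else count) 0

-- ===== PORT B =====
def countTotal_alt (ls : List Int) (B : List Int) : Int :=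
  let p : Int × Int := ls.foldl (fun (p : Int × Int) x => (p.1 + x, p.2 + p.1 + x)) (0, 0)
  let total : Int := p.2
  (PySem.List.pyRange 0 ((ls.length : Int)) 1).foldl (fun count i =>
    if PySem.List.pyGetD B i 0 = total then count + 1 else count) 0

-- ===== PRECONDITION & SPEC =====
-- A indexes B[i] for every i < len(ls), so it raises IndexError when len(B) < len(ls);
-- exactly those inputs are excluded (B does the same there).
def Pre_countTotal (ls : List Int) (B : List Int) : Prop := ls.length ≤ B.length
instance (ls : List Int) (B : List Int) : Decidable (Pre_countTotal ls B) := by unfold Pre_countTotal; infer_instance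
def pvWitness_countTotal : List Int × List Int := ([1, -2, 3], [4, 2, 2, 7])
def Spec_countTotal (ls : List Int) (B : List Int) (out : Int) : Prop := out = countTotal_alt ls B
instance (ls : List Int) (B : List Int) (out : Int) : Decidable (Spec_countTotal ls B out) := by unfold Spec_countTotal; infer_instance

-- ===== CLAIM (what is proved, stated in full; the proofs are below) =====
def Claim_equal_countTotal : Prop := ∀ (ls : List Int) (B : List Int), Dom_countTotal ls B → Pre_countTotal ls B → Spec_countTotal ls B (countTotal ls B)

-- ===== LEMMAS AND PROOFS =====

-- sum of the first m entries (getD-defaulted), and the sum of the first m prefix sums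
def pvS (ls : List Int) (m : Nat) : Int := ((List.range m).map (fun k => ls.getD k 0)).sum
def pvT (ls : List Int) (m : Nat) : Int := ((List.range m).map (fun j => pvS ls (j + 1))).sum
-- sum of all prefix sums, by structural recursion (B's invariant total)
def pvSP : List Int → Int
  | [] => 0
  | x :: xs => ((xs.length : Int) + 1) * x + pvSP xs

lemma pv_inner (ls : List Int) (m : Nat) (t : Int) :
    (PySem.List.pyRange 0 (m : Int) 1).foldl (fun t k => t + PySem.List.pyGetD ls k 0) t
      = t + pvS ls m := by
  induction m generalizing t with
  | zero => simp [PySem.List.pyRange_one_eq_nil, pvS]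
  | succ m ih =>
    have h : ((m + 1 : Nat) : Int) = (m : Int) + 1 := by push_cast; ring
    rw [h, PySem.List.pyRange_one_succ_right (by positivity), List.foldl_append, ih]
    simp [pvS, List.range_succ, PySem.List.pyGetD_natCast, add_assoc]

lemma pv_middle (ls : List Int) (m : Nat) (t : Int) :
    (PySem.List.pyRange 0 (m : Int) 1).foldl (fun t j =>
        (PySem.List.pyRange 0 (1 + j) 1).foldl (fun t k =>
          t + PySem.List.pyGetD ls k 0) t) t
      = t + pvT ls m := by
  induction m generalizing t with
  | zero => simp [PySem.List.pyRange_one_eq_nil, pvT]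
  | succ m ih =>
    have h : ((m + 1 : Nat) : Int) = (m : Int) + 1 := by push_cast; ring
    have h2 : (1 : Int) + (m : Int) = ((m + 1 : Nat) : Int) := by push_cast; ring
    rw [h, PySem.List.pyRange_one_succ_right (by positivity), List.foldl_append, ih]
    simp only [List.foldl, h2, pv_inner]
    simp [pvT, List.range_succ, add_assoc]

lemma pvS_cons (x : Int) (xs : List Int) (j : Nat) :
    pvS (x :: xs) (j + 1) = x + pvS xs j := by
  simp [pvS, List.range_succ_eq_map, Function.comp_def, List.getElem?_cons_succ]

lemma pvT_len (ls : List Int) : pvT ls ls.length = pvSP ls := by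
  induction ls with
  | nil => simp [pvT, pvSP]
  | cons x xs ih =>
    simp only [pvT, List.length_cons, pvSP, ← ih]
    simp only [pvS_cons]
    rw [PySem.List.sum_map_add_int (List.range (xs.length + 1)) (fun _ => x) (fun j => pvS xs j),
        PySem.List.sum_map_const_int]
    have hrest : ((List.range (xs.length + 1)).map (fun j => pvS xs j)).sum
        = ((List.range xs.length).map (fun j => pvS xs (j + 1))).sum := by
      rw [List.range_succ_eq_map, List.map_cons, List.sum_cons, List.map_map]
      have h0 : pvS xs 0 = 0 := by simp [pvS]
      rw [h0, zero_add]
      simp [Function.comp_def]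
    rw [hrest]
    simp only [List.length_range]
    push_cast; ring

lemma pv_pair (ls : List Int) (r t : Int) :
    ls.foldl (fun (p : Int × Int) x => (p.1 + x, p.2 + p.1 + x)) (r, t)
      = (r + ls.sum, t + (ls.length : Int) * r + pvSP ls) := by
  induction ls generalizing r t with
  | nil => simp [pvSP]
  | cons x xs ih =>
    simp only [List.foldl, ih, pvSP, List.sum_cons, List.length_cons, Prod.mk.injEq]
    constructor
    · ring
    · push_cast; ring

lemma pv_count_congr (L : List Int) (B : List Int) (X Y c : Int) (h : X = Y) :
    L.foldl (fun c i => if X = PySem.List.pyGetD B i 0 then c + 1 else c) c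
      = L.foldl (fun c i => if PySem.List.pyGetD B i 0 = Y then c + 1 else c) c := by
  subst h
  have hf : (fun (c i : Int) => if X = PySem.List.pyGetD B i 0 then c + 1 else c)
      = (fun (c i : Int) => if PySem.List.pyGetD B i 0 = X then c + 1 else c) := by
    funext c i; exact if_congr eq_comm rfl rfl
  rw [hf]

-- ===== VERDICT (by name: the statement is the Claim_ definition above) =====
theorem countTotal_spec : Claim_equal_countTotal := by
  intro ls B _ _
  unfold Spec_countTotal countTotal countTotal_alt
  simp only [pv_middle ls ls.length, pv_pair ls 0 0, zero_add, mul_zero, add_zero]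
  exact pv_count_congr _ B _ _ 0 (pvT_len ls)
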